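-- pv_equiv track=rewrite | github.com/gloqont/AWS | apps/api/main.py | _from_twelve_symbol
-- ===== SOURCE A (Python) =====
-- def _from_twelve_symbol(td_symbol: str) -> str:
--     """Map Twelve Data exchange suffixes back to UI symbol convention."""
--     s = (td_symbol or "").strip().upper()
--     suffix_map = {
--         ":NSE": ".NS",
--         ":BSE": ".BO",
--         ":LSE": ".L",
--         ":TSX": ".TO",
--         ":HKEX": ".HK",
--     }
--     for k, v in suffix_map.items():
--         if s.endswith(k):
--             return f"{s[:-len(k)]}{v}"
--     return s
-- ===== SOURCE B (Python) =====
-- _SUFFIX = {"NSE": ".NS", "BSE": ".BO", "LSE": ".L", "TSX": ".TO", "HKEX": ".HK"}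
--
-- def _from_twelve_symbol(td_symbol: str) -> str:
--     """Map Twelve Data exchange suffixes back to UI symbol convention."""
--     s = (td_symbol or "").strip().upper()
--     head, sep, tail = s.rpartition(":")
--     if sep and tail in _SUFFIX:
--         return head + _SUFFIX[tail]
--     return s
-- ===== Notes on version B (the rewrite author's own statement) =====
-- stated objective: simpler
-- what changed: Replaces the per-entry endswith scan over a colon-prefixed suffix dict by a single rpartition parse at the last colon followed by one direct dict lookup of the bare exchange token.
import Mathlib
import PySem

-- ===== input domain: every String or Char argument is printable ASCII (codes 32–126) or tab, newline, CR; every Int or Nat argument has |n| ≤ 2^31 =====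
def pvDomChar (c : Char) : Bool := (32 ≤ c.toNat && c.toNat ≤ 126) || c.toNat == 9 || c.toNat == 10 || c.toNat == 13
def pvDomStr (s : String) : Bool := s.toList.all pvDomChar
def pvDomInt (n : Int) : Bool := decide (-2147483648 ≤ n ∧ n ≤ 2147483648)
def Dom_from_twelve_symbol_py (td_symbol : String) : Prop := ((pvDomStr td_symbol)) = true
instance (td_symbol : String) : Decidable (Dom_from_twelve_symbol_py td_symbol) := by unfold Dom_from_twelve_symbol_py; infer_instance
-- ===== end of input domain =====

-- B replaces A's per-entry endswith scan by a single rpartition(':') parse plus one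
-- dict lookup of the bare exchange token (objective: simpler).

-- ===== PORT A =====
def from_twelve_symbol_py (td_symbol : String) : String :=
  -- s = (td_symbol or "").strip().upper()   ('or ""' : empty string stays empty)
  let s := PySem.Str.upper (PySem.Str.strip (if td_symbol == "" then "" else td_symbol))
  -- the dict iteration unrolled in insertion order, first match returns
  if PySem.Str.endswith s ":NSE" then PySem.Str.slice s none (some (-4)) ++ ".NS"
  else if PySem.Str.endswith s ":BSE" then PySem.Str.slice s none (some (-4)) ++ ".BO"
  else if PySem.Str.endswith s ":LSE" then PySem.Str.slice s none (some (-4)) ++ ".L"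
  else if PySem.Str.endswith s ":TSX" then PySem.Str.slice s none (some (-4)) ++ ".TO"
  else if PySem.Str.endswith s ":HKEX" then PySem.Str.slice s none (some (-5)) ++ ".HK"
  else s

-- ===== PORT B =====
-- hand port of str.rpartition(":") (not in PySem): scan the reversed list for the
-- first ':' (= last ':' of the original); exact on all inputs
def pvRevSplitColon : List Char → Option (List Char × List Char)
  | [] => none
  | c :: r => if c = ':' then some ([], r)
              else (pvRevSplitColon r).map (fun pq => (c :: pq.1, pq.2))

def pvRPartitionColon (cs : List Char) : List Char × List Char × List Char :=
  match pvRevSplitColon cs.reverse with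
  | none => ([], [], cs)
  | some (p, q) => (q.reverse, [':'], p.reverse)

def pvSuffixDict : PySem.Dict String String :=
  PySem.Dict.mk [("NSE", ".NS"), ("BSE", ".BO"), ("LSE", ".L"), ("TSX", ".TO"), ("HKEX", ".HK")]

def from_twelve_symbol_py_alt (td_symbol : String) : String :=
  let s := PySem.Str.upper (PySem.Str.strip (if td_symbol == "" then "" else td_symbol))
  let hst := pvRPartitionColon s.toList
  if hst.2.1 ≠ [] then
    match pvSuffixDict.get? (String.ofList hst.2.2) with
    | some v => String.ofList hst.1 ++ v
    | none => s
  else s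

-- ===== PRECONDITION & SPEC =====
def Spec_from_twelve_symbol_py (td_symbol : String) (out : String) : Prop := out = from_twelve_symbol_py_alt td_symbol
instance (td_symbol : String) (out : String) : Decidable (Spec_from_twelve_symbol_py td_symbol out) := by unfold Spec_from_twelve_symbol_py; infer_instance

-- ===== CLAIM (what is proved, stated in full; the proofs are below) =====
def Claim_equal_from_twelve_symbol_py : Prop := ∀ (td_symbol : String), Dom_from_twelve_symbol_py td_symbol → Spec_from_twelve_symbol_py td_symbol (from_twelve_symbol_py td_symbol)

-- ===== LEMMAS AND PROOFS =====

theorem pvRevSplitColon_none (r : List Char) (h : pvRevSplitColon r = none) : ':' ∉ r := by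
  induction r with
  | nil => simp
  | cons c r ih =>
    simp only [pvRevSplitColon] at h
    by_cases hc : c = ':'
    · simp [hc] at h
    · rcases hm : pvRevSplitColon r with _ | pq
      · simp only [List.mem_cons, not_or]
        exact ⟨fun e => hc e.symm, ih hm⟩
      · simp [hc, hm] at h

theorem pvRevSplitColon_some (r p q : List Char) (h : pvRevSplitColon r = some (p, q)) :
    r = p ++ ':' :: q ∧ ':' ∉ p := by
  induction r generalizing p q with
  | nil => simp [pvRevSplitColon] at h
  | cons c r ih =>
    simp only [pvRevSplitColon] at h
    by_cases hc : c = ':'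
    · simp [hc] at h
      obtain ⟨h1, h2⟩ := h
      subst h1 h2
      simp [hc]
    · rcases hm : pvRevSplitColon r with _ | ⟨p', q'⟩
      · simp [hc, hm] at h
      · simp [hc, hm] at h
        obtain ⟨rfl, rfl⟩ := h
        obtain ⟨hr, hp⟩ := ih p' q' hm
        refine ⟨by simp [hr], ?_⟩
        simp only [List.mem_cons, not_or]
        exact ⟨fun e => hc e.symm, hp⟩

theorem colon_prefix_unique (p q t rest : List Char) (hp : ':' ∉ p) (ht : ':' ∉ t)
    (h : p ++ ':' :: q = t ++ ':' :: rest) : p = t := by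
  induction p generalizing t with
  | nil =>
    cases t with
    | nil => rfl
    | cons d t' =>
      simp at h
      exact absurd (h.1 ▸ List.mem_cons_self) ht
  | cons c p' ih =>
    cases t with
    | nil =>
      simp at h
      exact absurd (h.1 ▸ List.mem_cons_self) hp
    | cons d t' =>
      simp at h
      obtain ⟨h1, h2⟩ := h
      have := ih t' (fun hm => hp (List.mem_cons_of_mem _ hm))
        (fun hm => ht (List.mem_cons_of_mem _ hm)) h2
      simp [h1, this]

-- s ends with (':' :: t.reverse ... ) read on the reversed list:
theorem ends_iff (s : String) (p q t : List Char) (hr : s.toList.reverse = p ++ ':' :: q)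
    (hp : ':' ∉ p) (ht : ':' ∉ t) (k : String) (hk : k.toList.reverse = t ++ [':']) :
    PySem.Str.endswith s k = true ↔ t = p := by
  rw [PySem.Str.endswith_eq, PySem.Chars.endswith_iff, ← List.reverse_prefix, hk, hr]
  constructor
  · rintro ⟨rest, hrest⟩
    exact (colon_prefix_unique p q t rest hp ht (by simpa using hrest.symm)).symm
  · rintro rfl
    exact ⟨q, by simp⟩

theorem take_head (p q : List Char) (n : Nat) (hn : p.length = n)
    (cs : List Char) (hcs : cs = q.reverse ++ ':' :: p.reverse) :
    List.take (cs.length - (n + 1)) cs = q.reverse := by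
  subst hcs
  have hlen : (q.reverse ++ ':' :: p.reverse).length = q.length + (n + 1) := by
    simp [hn]
  rw [hlen]
  exact List.take_left' (l₂ := ':' :: p.reverse) (l₁ := q.reverse) (by simp)

theorem ofList_ne (p : List Char) (t : List Char) (hne : p ≠ t.reverse) :
    String.ofList p.reverse ≠ String.ofList t := by
  intro h
  have := congrArg String.toList h
  simp only [String.toList_ofList] at this
  exact hne (by simpa using congrArg List.reverse this)

-- the shared core: for any normalized string, the two bodies agree
theorem core_eq (s : String) :
    (if PySem.Str.endswith s ":NSE" then PySem.Str.slice s none (some (-4)) ++ ".NS"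
     else if PySem.Str.endswith s ":BSE" then PySem.Str.slice s none (some (-4)) ++ ".BO"
     else if PySem.Str.endswith s ":LSE" then PySem.Str.slice s none (some (-4)) ++ ".L"
     else if PySem.Str.endswith s ":TSX" then PySem.Str.slice s none (some (-4)) ++ ".TO"
     else if PySem.Str.endswith s ":HKEX" then PySem.Str.slice s none (some (-5)) ++ ".HK"
     else s)
    =
    (let hst := pvRPartitionColon s.toList
     if hst.2.1 ≠ [] then
       match pvSuffixDict.get? (String.ofList hst.2.2) with
       | some v => String.ofList hst.1 ++ v
       | none => s
     else s) := by
  rcases h : pvRevSplitColon s.toList.reverse with _ | ⟨p, q⟩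
  · -- no colon at all: every endswith is false, B's sep is empty
    have hnc : ':' ∉ s.toList := fun hm =>
      pvRevSplitColon_none _ h (List.mem_reverse.mpr hm)
    have hf : ∀ (k : String), ':' ∈ k.toList → PySem.Str.endswith s k = false := by
      intro k hkmem
      rw [← Bool.not_eq_true, PySem.Str.endswith_eq, PySem.Chars.endswith_iff]
      exact fun hsuf => hnc (hsuf.subset hkmem)
    rw [hf ":NSE" (by decide), hf ":BSE" (by decide), hf ":LSE" (by decide),
        hf ":TSX" (by decide), hf ":HKEX" (by decide)]
    simp [pvRPartitionColon, h]
  · obtain ⟨hr, hp⟩ := pvRevSplitColon_some _ _ _ h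
    have hcs : s.toList = q.reverse ++ ':' :: p.reverse := by
      have := congrArg List.reverse hr
      simpa using this
    have e1 := ends_iff s p q ['E','S','N'] hr hp (by decide) ":NSE" (by decide)
    have e2 := ends_iff s p q ['E','S','B'] hr hp (by decide) ":BSE" (by decide)
    have e3 := ends_iff s p q ['E','S','L'] hr hp (by decide) ":LSE" (by decide)
    have e4 := ends_iff s p q ['X','S','T'] hr hp (by decide) ":TSX" (by decide)
    have e5 := ends_iff s p q ['X','E','K','H'] hr hp (by decide) ":HKEX" (by decide)
    have hslice4 : p.length = 3 → PySem.Str.slice s none (some (-4)) = String.ofList q.reverse := by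
      intro h3
      have : (PySem.Str.slice s none (some (-4))).toList = q.reverse := by
        rw [PySem.Str.toList_slice, PySem.Chars.slice_eq_listSlice,
            PySem.List.slice_to_neg_ofNat _ 4 (by norm_num)]
        exact take_head p q 3 h3 _ hcs
      rw [← this, String.ofList_toList]
    have hslice5 : p.length = 4 → PySem.Str.slice s none (some (-5)) = String.ofList q.reverse := by
      intro h4
      have : (PySem.Str.slice s none (some (-5))).toList = q.reverse := by
        rw [PySem.Str.toList_slice, PySem.Chars.slice_eq_listSlice,
            PySem.List.slice_to_neg_ofNat _ 5 (by norm_num)]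
        exact take_head p q 4 h4 _ hcs
      rw [← this, String.ofList_toList]
    simp only [pvRPartitionColon, h]
    by_cases c1 : p = ['E','S','N']
    · subst c1
      rw [(e1.mpr rfl : _ = true), hslice4 rfl]
      simp [pvSuffixDict, PySem.Dict.get?]
    · by_cases c2 : p = ['E','S','B']
      · subst c2
        have f1 : PySem.Str.endswith s ":NSE" = false := by
          rw [← Bool.not_eq_true, e1]; decide
        rw [f1, (e2.mpr rfl : _ = true), hslice4 rfl]
        simp [pvSuffixDict, PySem.Dict.get?]
      · by_cases c3 : p = ['E','S','L']
        · subst c3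
          have f1 : PySem.Str.endswith s ":NSE" = false := by
            rw [← Bool.not_eq_true, e1]; decide
          have f2 : PySem.Str.endswith s ":BSE" = false := by
            rw [← Bool.not_eq_true, e2]; decide
          rw [f1, f2, (e3.mpr rfl : _ = true), hslice4 rfl]
          simp [pvSuffixDict, PySem.Dict.get?]
        · by_cases c4 : p = ['X','S','T']
          · subst c4
            have f1 : PySem.Str.endswith s ":NSE" = false := by
              rw [← Bool.not_eq_true, e1]; decide
            have f2 : PySem.Str.endswith s ":BSE" = false := by
              rw [← Bool.not_eq_true, e2]; decide
            have f3 : PySem.Str.endswith s ":LSE" = false := by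
              rw [← Bool.not_eq_true, e3]; decide
            rw [f1, f2, f3, (e4.mpr rfl : _ = true), hslice4 rfl]
            simp [pvSuffixDict, PySem.Dict.get?]
          · by_cases c5 : p = ['X','E','K','H']
            · subst c5
              have f1 : PySem.Str.endswith s ":NSE" = false := by
                rw [← Bool.not_eq_true, e1]; decide
              have f2 : PySem.Str.endswith s ":BSE" = false := by
                rw [← Bool.not_eq_true, e2]; decide
              have f3 : PySem.Str.endswith s ":LSE" = false := by
                rw [← Bool.not_eq_true, e3]; decide
              have f4 : PySem.Str.endswith s ":TSX" = false := by
                rw [← Bool.not_eq_true, e4]; decide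
              rw [f1, f2, f3, f4, (e5.mpr rfl : _ = true), hslice5 rfl]
              simp [pvSuffixDict, PySem.Dict.get?]
            · -- last colon token is not one of the five: both return s
              have f1 : PySem.Str.endswith s ":NSE" = false := by
                rw [← Bool.not_eq_true, e1]; exact fun hh => c1 hh.symm
              have f2 : PySem.Str.endswith s ":BSE" = false := by
                rw [← Bool.not_eq_true, e2]; exact fun hh => c2 hh.symm
              have f3 : PySem.Str.endswith s ":LSE" = false := by
                rw [← Bool.not_eq_true, e3]; exact fun hh => c3 hh.symm
              have f4 : PySem.Str.endswith s ":TSX" = false := by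
                rw [← Bool.not_eq_true, e4]; exact fun hh => c4 hh.symm
              have f5 : PySem.Str.endswith s ":HKEX" = false := by
                rw [← Bool.not_eq_true, e5]; exact fun hh => c5 hh.symm
              rw [f1, f2, f3, f4, f5]
              have g1 := ofList_ne p ['N','S','E'] (by simpa using c1)
              have g2 := ofList_ne p ['B','S','E'] (by simpa using c2)
              have g3 := ofList_ne p ['L','S','E'] (by simpa using c3)
              have g4 := ofList_ne p ['T','S','X'] (by simpa using c4)
              have g5 := ofList_ne p ['H','K','E','X'] (by simpa using c5)
              have b1 : ("NSE" == String.ofList p.reverse) = false := by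
                rw [beq_eq_false_iff_ne]; exact fun e => g1 (by rw [← e])
              have b2 : ("BSE" == String.ofList p.reverse) = false := by
                rw [beq_eq_false_iff_ne]; exact fun e => g2 (by rw [← e])
              have b3 : ("LSE" == String.ofList p.reverse) = false := by
                rw [beq_eq_false_iff_ne]; exact fun e => g3 (by rw [← e])
              have b4 : ("TSX" == String.ofList p.reverse) = false := by
                rw [beq_eq_false_iff_ne]; exact fun e => g4 (by rw [← e])
              have b5 : ("HKEX" == String.ofList p.reverse) = false := by
                rw [beq_eq_false_iff_ne]; exact fun e => g5 (by rw [← e])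
              simp only [pvSuffixDict, PySem.Dict.get?]
              simp [List.find?, b1, b2, b3, b4, b5]

-- ===== VERDICT (by name: the statement is the Claim_ definition above) =====
theorem from_twelve_symbol_py_spec : Claim_equal_from_twelve_symbol_py := by
  intro td _
  unfold Spec_from_twelve_symbol_py from_twelve_symbol_py from_twelve_symbol_py_alt
  exact core_eq _
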